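-- pv_equiv track=rewrite | github.com/kritidutta01/multimodal-chat-with-pdf | indian_filings_pipeline/src/scrapers/utils.py | is_financial_document
-- ===== SOURCE A (Python) =====
-- def is_financial_document(title: str, url: str) -> bool:
--     """Check if document appears to be financial/company related"""
--     text = f"{title} {url}".lower()
--
--     financial_keywords = [
--         'annual', 'quarterly', 'financial', 'result', 'report', 'statement',
--         'balance sheet', 'profit', 'loss', 'cash flow', 'earnings',
--         'presentation', 'investor', 'shareholding', 'board meeting'
--     ]
--
--     return any(keyword in text for keyword in financial_keywords)
-- ===== SOURCE B (Python) =====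
-- _KEYWORDS = [
--     'annual', 'quarterly', 'financial', 'result', 'report', 'statement',
--     'balance sheet', 'profit', 'loss', 'cash flow', 'earnings',
--     'presentation', 'investor', 'shareholding', 'board meeting'
-- ]
--
-- # first-character dispatch index, built once
-- _INDEX = {}
-- for _kw in _KEYWORDS:
--     _INDEX.setdefault(_kw[0], []).append(_kw)
--
--
-- def is_financial_document(title: str, url: str) -> bool:
--     """Check if document appears to be financial/company related"""
--     text = f"{title} {url}".lower()
--     for i, ch in enumerate(text):
--         for kw in _INDEX.get(ch, ()):
--             if text.startswith(kw, i):
--                 return True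
--     return False
-- ===== Notes on version B (the rewrite author's own statement) =====
-- stated objective: alternative
-- what changed: Inverts the loop structure: instead of A's per-keyword substring searches over the whole text, B builds a first-character dispatch index of the keywords once and makes a single left-to-right pass over the text positions, trying only the keywords bucketed under the current character with startswith.
import Mathlib
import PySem

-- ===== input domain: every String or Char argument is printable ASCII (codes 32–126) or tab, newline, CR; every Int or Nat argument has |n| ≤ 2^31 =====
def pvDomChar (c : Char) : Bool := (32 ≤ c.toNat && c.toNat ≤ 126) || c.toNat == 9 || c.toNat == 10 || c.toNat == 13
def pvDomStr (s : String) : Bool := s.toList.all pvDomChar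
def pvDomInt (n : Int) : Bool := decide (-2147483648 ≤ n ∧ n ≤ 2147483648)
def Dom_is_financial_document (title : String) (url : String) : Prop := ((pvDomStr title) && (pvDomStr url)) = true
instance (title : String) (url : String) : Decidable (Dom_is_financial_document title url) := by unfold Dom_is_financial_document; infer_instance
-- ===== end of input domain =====

-- B inverts A's loop structure: a first-character dispatch index of the keywords is built once,
-- then ONE pass over the text positions tries only the keywords bucketed under the current character.

-- ===== PORT A =====
def finKeywords : List (List Char) :=
  ["annual".toList, "quarterly".toList, "financial".toList, "result".toList,
   "report".toList, "statement".toList, "balance sheet".toList, "profit".toList,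
   "loss".toList, "cash flow".toList, "earnings".toList, "presentation".toList,
   "investor".toList, "shareholding".toList, "board meeting".toList]

def is_financial_document (title : String) (url : String) : Bool :=
  -- text = f"{title} {url}".lower()
  let text := PySem.Chars.lower (title.toList ++ ' ' :: url.toList)
  -- any(keyword in text for keyword in financial_keywords)
  finKeywords.any (fun k => PySem.Chars.isIn k text)

-- ===== PORT B =====
-- _INDEX: first-character dispatch dict, built once by the module-level loop
def finIndex : PySem.Dict Char (List (List Char)) :=
  finKeywords.foldl (fun d k => d.insert k.head! (d.getD k.head! [] ++ [k])) PySem.Dict.empty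

-- the position loop: 'for i, ch in enumerate(text): for kw in _INDEX.get(ch, ()): if text.startswith(kw, i)'
-- (recursion on the remaining suffix; text.startswith(kw, i) = kw.isPrefixOf (suffix at i))
def finScan : List Char → Bool
  | [] => false
  | c :: rest =>
      (finIndex.getD c []).any (fun k => k.isPrefixOf (c :: rest)) || finScan rest

def is_financial_document_alt (title : String) (url : String) : Bool :=
  let text := PySem.Chars.lower (title.toList ++ ' ' :: url.toList)
  finScan text

-- ===== PRECONDITION & SPEC =====
def Spec_is_financial_document (title : String) (url : String) (out : Bool) : Prop := out = is_financial_document_alt title url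
instance (title : String) (url : String) (out : Bool) : Decidable (Spec_is_financial_document title url out) := by unfold Spec_is_financial_document; infer_instance

-- ===== CLAIM (what is proved, stated in full; the proofs are below) =====
def Claim_equal_is_financial_document : Prop := ∀ (title : String) (url : String), Dom_is_financial_document title url → Spec_is_financial_document title url (is_financial_document title url)

-- ===== LEMMAS AND PROOFS =====

-- at any one position, the dispatch bucket tries exactly the keywords that can match there:
-- a keyword matching at the position must start with its character, and the bucket of c holds
-- exactly the keywords starting with c.
-- finIndex evaluated (proved by kernel computation below)
theorem finIndex_eval : finIndex = PySem.Dict.mk [('a', ["annual".toList]), ('q', ["quarterly".toList]), ('f', ["financial".toList]), ('r', ["result".toList, "report".toList]), ('s', ["statement".toList, "shareholding".toList]), ('b', ["balance sheet".toList, "board meeting".toList]), ('p', ["profit".toList, "presentation".toList]), ('l', ["loss".toList]), ('c', ["cash flow".toList]), ('e', ["earnings".toList]), ('i', ["investor".toList])] := by decide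

-- at any one position, the dispatch bucket tries exactly the keywords that can match there:
-- a keyword matching at the position must start with its character, and the bucket of c holds
-- exactly the keywords starting with c.
theorem finIndex_bucket_any (c : Char) (rest : List Char) :
    (finIndex.getD c []).any (fun k => k.isPrefixOf (c :: rest))
      = finKeywords.any (fun k => k.isPrefixOf (c :: rest)) := by
  by_cases h1 : c = 'a'; · subst h1; simp [finIndex_eval, PySem.Dict.getD, PySem.Dict.get?_mk_cons, finKeywords, List.isPrefixOf]
  by_cases h2 : c = 'q'; · subst h2; simp [finIndex_eval, PySem.Dict.getD, PySem.Dict.get?_mk_cons, finKeywords, List.isPrefixOf]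
  by_cases h3 : c = 'f'; · subst h3; simp [finIndex_eval, PySem.Dict.getD, PySem.Dict.get?_mk_cons, finKeywords, List.isPrefixOf]
  by_cases h4 : c = 'r'; · subst h4; simp [finIndex_eval, PySem.Dict.getD, PySem.Dict.get?_mk_cons, finKeywords, List.isPrefixOf]
  by_cases h5 : c = 's'; · subst h5; simp [finIndex_eval, PySem.Dict.getD, PySem.Dict.get?_mk_cons, finKeywords, List.isPrefixOf]
  by_cases h6 : c = 'b'; · subst h6; simp [finIndex_eval, PySem.Dict.getD, PySem.Dict.get?_mk_cons, finKeywords, List.isPrefixOf]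
  by_cases h7 : c = 'p'; · subst h7; simp [finIndex_eval, PySem.Dict.getD, PySem.Dict.get?_mk_cons, finKeywords, List.isPrefixOf]
  by_cases h8 : c = 'l'; · subst h8; simp [finIndex_eval, PySem.Dict.getD, PySem.Dict.get?_mk_cons, finKeywords, List.isPrefixOf]
  by_cases h9 : c = 'c'; · subst h9; simp [finIndex_eval, PySem.Dict.getD, PySem.Dict.get?_mk_cons, finKeywords, List.isPrefixOf]
  by_cases h10 : c = 'e'; · subst h10; simp [finIndex_eval, PySem.Dict.getD, PySem.Dict.get?_mk_cons, finKeywords, List.isPrefixOf]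
  by_cases h11 : c = 'i'; · subst h11; simp [finIndex_eval, PySem.Dict.getD, PySem.Dict.get?_mk_cons, finKeywords, List.isPrefixOf]
  have e1 : ('a' == c) = false := beq_eq_false_iff_ne.mpr (fun h => h1 h.symm)
  have e2 : ('q' == c) = false := beq_eq_false_iff_ne.mpr (fun h => h2 h.symm)
  have e3 : ('f' == c) = false := beq_eq_false_iff_ne.mpr (fun h => h3 h.symm)
  have e4 : ('r' == c) = false := beq_eq_false_iff_ne.mpr (fun h => h4 h.symm)
  have e5 : ('s' == c) = false := beq_eq_false_iff_ne.mpr (fun h => h5 h.symm)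
  have e6 : ('b' == c) = false := beq_eq_false_iff_ne.mpr (fun h => h6 h.symm)
  have e7 : ('p' == c) = false := beq_eq_false_iff_ne.mpr (fun h => h7 h.symm)
  have e8 : ('l' == c) = false := beq_eq_false_iff_ne.mpr (fun h => h8 h.symm)
  have e9 : ('c' == c) = false := beq_eq_false_iff_ne.mpr (fun h => h9 h.symm)
  have e10 : ('e' == c) = false := beq_eq_false_iff_ne.mpr (fun h => h10 h.symm)
  have e11 : ('i' == c) = false := beq_eq_false_iff_ne.mpr (fun h => h11 h.symm)
  simp [finIndex_eval, PySem.Dict.getD, finKeywords, List.isPrefixOf, PySem.Dict.get?,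
    e1, e2, e3, e4, e5, e6, e7, e8, e9, e10, e11]

-- the dispatch scan finds a match iff some keyword is a substring of the text
theorem finScan_eq_any_isIn (t : List Char) :
    finScan t = finKeywords.any (fun k => PySem.Chars.isIn k t) := by
  induction t with
  | nil => decide
  | cons c rest ih =>
      simp only [finScan, finIndex_bucket_any, ih]
      rw [Bool.eq_iff_iff]
      simp only [Bool.or_eq_true, List.any_eq_true, List.isPrefixOf_iff_prefix,
        PySem.Chars.isIn_iff_infix, List.infix_cons_iff]
      constructor
      · rintro (⟨k, hk, h⟩ | ⟨k, hk, h⟩)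
        · exact ⟨k, hk, Or.inl h⟩
        · exact ⟨k, hk, Or.inr h⟩
      · rintro ⟨k, hk, h | h⟩
        · exact Or.inl ⟨k, hk, h⟩
        · exact Or.inr ⟨k, hk, h⟩

-- ===== VERDICT (by name: the statement is the Claim_ definition above) =====
theorem is_financial_document_spec : Claim_equal_is_financial_document := by
  intro title url _
  unfold Spec_is_financial_document is_financial_document is_financial_document_alt
  rw [finScan_eq_any_isIn]
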